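-- pv_equiv track=rewrite | github.com/waynechen97/ECE345-Assignments | A1/QuickSort.py | DetermineInputSizeList
-- ===== SOURCE A (Python) =====
-- def DetermineInputSizeList(Arr, buckets):
--     InputSize = []
--     i = int(len(Arr)/buckets)
--     for idx, value in enumerate(Arr):
--         if idx % i == 0 and idx != 0:
--             InputSize.append(idx)
--         if idx == len(Arr) - 1:
--             InputSize.append(idx)
--     return InputSize
-- ===== SOURCE B (Python) =====
-- def DetermineInputSizeList(Arr, buckets):
--     n = len(Arr)
--     if n == 0:
--         return []
--     step = abs(int(n / buckets))
--     return list(range(step, n, step)) + [n - 1]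
-- ===== Notes on version B (the rewrite author's own statement) =====
-- stated objective: faster
-- what changed: B generates the bucket-boundary indices directly with range(step, n, step) and appends n-1, instead of A's scan over every element testing idx % i == 0.
import Mathlib
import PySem

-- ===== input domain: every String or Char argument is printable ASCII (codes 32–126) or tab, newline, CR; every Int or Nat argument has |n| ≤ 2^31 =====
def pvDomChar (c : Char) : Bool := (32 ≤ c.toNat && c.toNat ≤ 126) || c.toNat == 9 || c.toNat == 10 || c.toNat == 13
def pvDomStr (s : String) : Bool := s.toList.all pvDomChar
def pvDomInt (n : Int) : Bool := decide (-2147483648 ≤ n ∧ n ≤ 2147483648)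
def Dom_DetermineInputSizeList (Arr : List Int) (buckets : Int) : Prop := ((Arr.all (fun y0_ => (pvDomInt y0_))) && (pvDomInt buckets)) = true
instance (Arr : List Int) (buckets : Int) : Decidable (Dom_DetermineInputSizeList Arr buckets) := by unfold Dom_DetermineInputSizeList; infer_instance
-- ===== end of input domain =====

-- B generates the bucket-boundary indices directly with range(step, n, step) and appends the
-- last index, instead of A's per-element scan testing idx % i == 0 on every index (objective: faster).


-- ===== PORT A =====
-- Python's int(len(Arr)/buckets) is ported by hand as Int.tdiv (truncation toward zero); this is
-- exact on the stated domain, where the float quotient truncates to the same integer.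
def DetermineInputSizeList (Arr : List Int) (buckets : Int) : List Int :=
  let i : Int := Int.tdiv (Arr.length : Int) buckets
  (PySem.List.enumerate Arr).foldl
    (fun acc p =>
      let acc := if PySem.Int.mod p.1 i == 0 && p.1 != 0 then acc ++ [p.1] else acc
      if p.1 == (Arr.length : Int) - 1 then acc ++ [p.1] else acc)
    []

-- ===== PORT B =====
def DetermineInputSizeList_alt (Arr : List Int) (buckets : Int) : List Int :=
  let n : Int := (Arr.length : Int)
  if n == 0 then []
  else
    let step : Int := |Int.tdiv n buckets|
    PySem.List.pyRange step n step ++ [n - 1]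

-- ===== PRECONDITION & SPEC =====
-- Pre_ excludes exactly the inputs where A raises ZeroDivisionError: buckets = 0 (division before
-- the loop), or a nonempty list with int(len/buckets) = 0, where idx % 0 raises inside A's loop.
def Pre_DetermineInputSizeList (Arr : List Int) (buckets : Int) : Prop :=
  buckets ≠ 0 ∧ (Arr = [] ∨ Int.tdiv (Arr.length : Int) buckets ≠ 0)
instance (Arr : List Int) (buckets : Int) : Decidable (Pre_DetermineInputSizeList Arr buckets) := by
  unfold Pre_DetermineInputSizeList; infer_instance

def pvWitness_DetermineInputSizeList : List Int × Int := ([1, 2, 3, 4], 2)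

def Spec_DetermineInputSizeList (Arr : List Int) (buckets : Int) (out : List Int) : Prop := out = DetermineInputSizeList_alt Arr buckets
instance (Arr : List Int) (buckets : Int) (out : List Int) : Decidable (Spec_DetermineInputSizeList Arr buckets out) := by unfold Spec_DetermineInputSizeList; infer_instance

-- ===== CLAIM (what is proved, stated in full; the proofs are below) =====
def Claim_equal_DetermineInputSizeList : Prop := ∀ (Arr : List Int) (buckets : Int), Dom_DetermineInputSizeList Arr buckets → Pre_DetermineInputSizeList Arr buckets → Spec_DetermineInputSizeList Arr buckets (DetermineInputSizeList Arr buckets)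

-- ===== LEMMAS AND PROOFS =====
theorem pv_flatMap_if_singleton {p : Int → Bool} (l : List Int) :
    l.flatMap (fun j => if p j then [j] else []) = l.filter p := by
  induction l with
  | nil => rfl
  | cons x xs ih => by_cases h : p x <;> simp [List.flatMap_cons, h, ih]

theorem pv_filter_range_eq_pyRange (step n : Int) (hs : 0 < step) :
    (PySem.List.pyRange 0 n 1).filter (fun j => decide ((step ∣ j) ∧ j ≠ 0)) =
      PySem.List.pyRange step n step := by
  have hs₁ : List.Pairwise (· < ·) ((PySem.List.pyRange 0 n 1).filter (fun j => decide ((step ∣ j) ∧ j ≠ 0))) :=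
    (PySem.List.pairwise_lt_pyRange_one 0 n).filter _
  have hs₂ : List.Pairwise (· < ·) (PySem.List.pyRange step n step) := by
    rw [PySem.List.pyRange_of_pos _ _ hs, List.pairwise_map]
    exact List.pairwise_lt_range.imp (fun {a b} h => by
      have h' : (a : Int) < b := by exact_mod_cast h
      nlinarith)
  have hmem : ∀ x : Int, x ∈ (PySem.List.pyRange 0 n 1).filter (fun j => decide ((step ∣ j) ∧ j ≠ 0)) ↔
      x ∈ PySem.List.pyRange step n step := by
    intro x
    rw [List.mem_filter, PySem.List.mem_pyRange_one, PySem.List.mem_pyRange_iff_of_pos hs]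
    simp only [decide_eq_true_eq]
    constructor
    · rintro ⟨⟨h0, hlt⟩, ⟨k, rfl⟩, hne⟩
      have hk : 1 ≤ k := by
        by_contra h
        have hk0 : k ≤ 0 := by omega
        have := mul_nonpos_of_nonneg_of_nonpos hs.le hk0
        omega
      have hstep : step * 1 ≤ step * k := mul_le_mul_of_nonneg_left hk hs.le
      exact ⟨by linarith, hlt, ⟨k - 1, by ring⟩⟩
    · rintro ⟨hle, hlt, k, hk⟩
      exact ⟨⟨by omega, hlt⟩, ⟨k + 1, by linear_combination hk⟩, by omega⟩
  have hperm : ((PySem.List.pyRange 0 n 1).filter (fun j => decide ((step ∣ j) ∧ j ≠ 0))).Perm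
      (PySem.List.pyRange step n step) :=
    List.perm_of_nodup_nodup_toFinset_eq (hs₁.imp ne_of_lt) (hs₂.imp ne_of_lt)
      (Finset.ext fun x => by simp only [List.mem_toFinset]; exact hmem x)
  exact hperm.eq_of_pairwise (fun a b _ _ h1 h2 => le_antisymm h1 h2) (hs₁.imp le_of_lt) (hs₂.imp le_of_lt)

theorem pv_flatMap_congr_mem {f g : Int → List Int} {l : List Int} (h : ∀ x ∈ l, f x = g x) :
    l.flatMap f = l.flatMap g := by
  induction l with
  | nil => rfl
  | cons x xs ih =>
      rw [List.flatMap_cons, List.flatMap_cons, h x (by simp),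
        ih (fun y hy => h y (by simp [hy]))]

theorem pv_main (Arr : List Int) (buckets : Int)
    (hi : Arr = [] ∨ Int.tdiv (Arr.length : Int) buckets ≠ 0) :
    DetermineInputSizeList Arr buckets = DetermineInputSizeList_alt Arr buckets := by
  rcases hi with rfl | hi
  · rfl
  have hA : Arr ≠ [] := by
    rintro rfl
    exact hi (by simp)
  have hn : 1 ≤ (Arr.length : Int) := by
    have := List.length_pos_iff.mpr hA; omega
  have hne0 : ((Arr.length : Int) == 0) = false := by simp; omega
  have hstep : 0 < |Int.tdiv (Arr.length : Int) buckets| := abs_pos.mpr hi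
  unfold DetermineInputSizeList DetermineInputSizeList_alt
  simp only [hne0, if_false, Bool.false_eq_true]
  set n : Int := (Arr.length : Int) with hn_def
  set i : Int := Int.tdiv n buckets with hi_def
  rw [PySem.List.foldl_congr_mem (PySem.List.enumerate Arr) _
      (fun acc p => acc ++ ((if PySem.Int.mod p.1 i == 0 && p.1 != 0 then [p.1] else []) ++
        (if p.1 == n - 1 then [p.1] else []))) []
      (by intro acc x _; split_ifs <;> simp_all <;> try assumption)]
  rw [PySem.List.foldl_append_eq_flatMap, List.nil_append]
  rw [PySem.List.enumerate_eq_map_pyRange Arr 0, List.flatMap_map]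
  simp only [PySem.List.len_eq]
  have hsplit : PySem.List.pyRange 0 n = PySem.List.pyRange 0 (n-1) ++ [n-1] := by
    have h := PySem.List.pyRange_one_succ_right (a := 0) (b := n-1) (by omega)
    rw [show n - 1 + 1 = n from by ring] at h
    exact h
  have hpred : ∀ j : Int, (PySem.Int.mod j i == 0 && j != 0) = decide ((|i| ∣ j) ∧ j ≠ 0) := by
    intro j
    by_cases hd : i ∣ j <;> by_cases hz : j = 0 <;>
      simp [hd, hz, PySem.Int.mod_eq_zero_iff_dvd, abs_dvd]
  rw [hsplit, List.flatMap_append]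
  rw [pv_flatMap_congr_mem (g := fun j => if PySem.Int.mod j i == 0 && j != 0 then [j] else [])
      (by
        intro x hx
        rw [PySem.List.mem_pyRange_one] at hx
        have hxne : (x == n - 1) = false := by simp; omega
        simp [hxne])]
  rw [pv_flatMap_if_singleton]
  have hlast : ([n-1] : List Int).flatMap (fun a =>
      (if PySem.Int.mod a i == 0 && a != 0 then [a] else []) ++
        if (a == n - 1) = true then [a] else []) =
      (List.filter (fun j => PySem.Int.mod j i == 0 && j != 0) [n-1]) ++ [n-1] := by
    simp [List.filter_singleton]
  rw [hlast, ← List.append_assoc, ← List.filter_append, ← hsplit]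
  rw [List.filter_congr (fun x _ => hpred x)]
  rw [pv_filter_range_eq_pyRange |i| n hstep]

-- ===== VERDICT (by name: the statement is the Claim_ definition above) =====
theorem DetermineInputSizeList_spec : Claim_equal_DetermineInputSizeList := by
  intro Arr buckets _ hpre
  unfold Spec_DetermineInputSizeList
  exact pv_main Arr buckets hpre.2
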